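-- pv_equiv track=rewrite | github.com/ynbh/know | src/know.py | _parse_globs
-- ===== SOURCE A (Python) =====
-- from typing import Optional
--
-- def _parse_globs(globs: Optional[list[str]]) -> list[str]:
--     processed: list[str] = []
--     if not globs:
--         return processed
--     for pattern in globs:
--         for g in pattern.split(","):
--             g = g.strip()
--             if g:
--                 processed.append(g)
--     return processed
-- ===== SOURCE B (Python) =====
-- def _parse_globs(globs):
--     processed = []
--     if not globs:
--         return processed
--     for pattern in globs:
--         buf = []    # committed characters of the current token (no leading/trailing space)
--         pend = []   # whitespace seen after a committed character, flushed only if more text follows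
--         for ch in pattern:
--             if ch == ',':
--                 if buf:
--                     processed.append(''.join(buf))
--                 buf = []
--                 pend = []
--             elif ch.isspace():
--                 if buf:
--                     pend.append(ch)
--             else:
--                 buf.extend(pend)
--                 pend = []
--                 buf.append(ch)
--         if buf:
--             processed.append(''.join(buf))
--     return processed
-- ===== Notes on version B (the rewrite author's own statement) =====
-- stated objective: alternative
-- what changed: Replaces A's split(',')/strip() library pipeline with a hand-written single-pass character state machine that builds each token with a committed-buffer plus pending-whitespace accumulator, emitting at commas and end of pattern.
import Mathlib
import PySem

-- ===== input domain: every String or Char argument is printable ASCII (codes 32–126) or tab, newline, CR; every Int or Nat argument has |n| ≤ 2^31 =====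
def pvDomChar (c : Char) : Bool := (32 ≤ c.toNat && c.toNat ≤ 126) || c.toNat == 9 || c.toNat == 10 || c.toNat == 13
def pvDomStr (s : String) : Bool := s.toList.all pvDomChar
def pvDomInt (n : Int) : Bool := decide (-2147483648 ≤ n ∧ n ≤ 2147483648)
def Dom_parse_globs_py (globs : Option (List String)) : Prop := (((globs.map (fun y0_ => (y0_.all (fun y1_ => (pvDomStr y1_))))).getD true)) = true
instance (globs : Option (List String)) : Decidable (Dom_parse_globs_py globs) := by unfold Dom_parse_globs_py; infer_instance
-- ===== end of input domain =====

-- B replaces A's split(',')/strip() library pipeline with a hand-written single-pass character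
-- state machine (committed buffer + pending whitespace, emit at commas and end of pattern).

-- ===== PORT A =====
def parse_globs_py (globs : Option (List String)) : List String :=
  match globs with
  | none => []                                -- 'if not globs: return processed' (None case)
  | some gs =>
    if gs.isEmpty then []                     -- 'if not globs: return processed' (empty-list case)
    else
      gs.foldl (fun processed pattern =>
        (((PySem.Str.split? pattern ",").getD [])).foldl (fun pr g =>
          let g2 := PySem.Str.strip g
          if g2 != "" then pr ++ [g2] else pr) processed) []
      -- split? is always 'some' here (sep "," ≠ ""), so '.getD []' never takes its default

-- ===== PORT B =====
-- one step of Source B's inner character loop: state = (processed, buf, pend)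
def pvScanStep (st : List String × List Char × List Char) (ch : Char) :
    List String × List Char × List Char :=
  let (pr, buf, pend) := st
  if ch = ',' then
    ((if buf.isEmpty then pr else pr ++ [String.ofList buf]), [], [])
  else if PySem.Chars.isspace ch then
    (pr, buf, if buf.isEmpty then pend else pend ++ [ch])  -- Python: 'if buf: pend.append(ch)'
  else
    (pr, buf ++ pend ++ [ch], [])

def parse_globs_py_alt (globs : Option (List String)) : List String :=
  match globs with
  | none => []
  | some gs =>
    if gs.isEmpty then []
    else
      gs.foldl (fun processed pattern =>
        let st := pattern.toList.foldl pvScanStep (processed, [], [])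
        if st.2.1.isEmpty then st.1 else st.1 ++ [String.ofList st.2.1]) []

-- ===== PRECONDITION & SPEC =====
def Spec_parse_globs_py (globs : Option (List String)) (out : List String) : Prop := out = parse_globs_py_alt globs
instance (globs : Option (List String)) (out : List String) : Decidable (Spec_parse_globs_py globs out) := by unfold Spec_parse_globs_py; infer_instance

-- ===== CLAIM =====
def Claim_equal_parse_globs_py : Prop := ∀ (globs : Option (List String)), Dom_parse_globs_py globs → Spec_parse_globs_py globs (parse_globs_py globs)

-- ===== LEMMAS AND PROOFS =====

-- A plain structural single-character splitter, used only to reason about PySem.Chars.splitOn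
def pvSplitC (c : Char) : List Char → List (List Char)
  | [] => [[]]
  | x :: xs =>
    if x = c then [] :: pvSplitC c xs
    else
      match pvSplitC c xs with
      | [] => [[x]]
      | h :: t => (x :: h) :: t

theorem pvSplitC_ne_nil (c : Char) (l : List Char) : pvSplitC c l ≠ [] := by
  cases l with
  | nil => simp [pvSplitC]
  | cons x xs =>
    simp only [pvSplitC]
    split
    · simp
    · split <;> simp

theorem pv_go_eq (c : Char) (fuel : Nat) (l cur : List Char) (acc : List (List Char))
    (h : l.length < fuel) :
    PySem.Chars.splitOn.go [c] fuel l cur acc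
      = acc.reverse ++ (pvSplitC c l).modifyHead (fun h => cur.reverse ++ h) := by
  induction fuel generalizing l cur acc with
  | zero => omega
  | succ fuel ih =>
    cases l with
    | nil => simp [PySem.Chars.splitOn.go, pvSplitC]
    | cons x xs =>
      rw [PySem.Chars.splitOn.go]
      by_cases hx : x = c
      · subst hx
        have hp : List.isPrefixOf [x] (x :: xs) = true := by simp [List.isPrefixOf]
        simp only [hp, if_true, List.length, List.drop_succ_cons, List.drop_zero]
        rw [ih xs [] (cur.reverse :: acc) (by simpa using Nat.lt_of_succ_lt_succ h)]
        simp only [pvSplitC]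
        cases hne : pvSplitC x xs <;> simp
      · have hp : List.isPrefixOf [c] (x :: xs) = false := by
          simp only [List.isPrefixOf, Bool.and_eq_false_iff]
          left; exact beq_eq_false_iff_ne.mpr (fun h' => hx h'.symm)
        simp only [hp, Bool.false_eq_true, if_false]
        rw [ih xs (x :: cur) acc (by simpa using Nat.lt_of_succ_lt_succ h)]
        simp only [pvSplitC, if_neg hx]
        rcases hne : pvSplitC c xs with _ | ⟨hd, tl⟩
        · exact absurd hne (pvSplitC_ne_nil c xs)
        · simp

theorem pv_splitOn_eq (c : Char) (l : List Char) :
    PySem.Chars.splitOn l [c] = pvSplitC c l := by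
  unfold PySem.Chars.splitOn
  rw [pv_go_eq c (l.length + 1) l [] [] (Nat.lt_succ_self _)]
  rcases hne : pvSplitC c l with _ | ⟨hd, tl⟩
  · exact absurd hne (pvSplitC_ne_nil c l)
  · simp

-- per-string contribution, at the String level
def pvPiece (s : String) : List String :=
  ((((PySem.Chars.splitOn s.toList [',']).map String.ofList).map PySem.Str.strip).filter (fun g => g != ""))

theorem pv_splits_eq (s : String) :
    ((PySem.Str.split? s ",").getD []) = (PySem.Chars.splitOn s.toList [',']).map String.ofList := by
  simp [PySem.Str.split?, PySem.Chars.split?]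

theorem pv_inner_loop (l : List String) (acc : List String) :
    l.foldl (fun pr g =>
      let g2 := PySem.Str.strip g
      if g2 != "" then pr ++ [g2] else pr) acc
    = acc ++ (l.filter (fun g => PySem.Str.strip g != "")).map PySem.Str.strip :=
  PySem.List.foldl_append_if (fun g => PySem.Str.strip g != "") PySem.Str.strip l acc

theorem pv_A_eq_flatMap (gs : List String) :
    gs.foldl (fun processed pattern =>
      (((PySem.Str.split? pattern ",").getD [])).foldl (fun pr g =>
        let g2 := PySem.Str.strip g
        if g2 != "" then pr ++ [g2] else pr) processed) []
    = gs.flatMap pvPiece := by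
  have hstep : ∀ (acc : List String) (pattern : String),
      (((PySem.Str.split? pattern ",").getD [])).foldl (fun pr g =>
        let g2 := PySem.Str.strip g
        if g2 != "" then pr ++ [g2] else pr) acc = acc ++ pvPiece pattern := by
    intro acc pattern
    rw [pv_inner_loop, pv_splits_eq]
    simp [pvPiece, List.filter_map, Function.comp_def, List.map_map]
  calc gs.foldl (fun processed pattern =>
          (((PySem.Str.split? pattern ",").getD [])).foldl (fun pr g =>
            let g2 := PySem.Str.strip g
            if g2 != "" then pr ++ [g2] else pr) processed) []
      = gs.foldl (fun acc pattern => acc ++ pvPiece pattern) [] := by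
        apply PySem.List.foldl_congr_mem
        intros
        apply hstep
    _ = gs.flatMap pvPiece := by
        rw [PySem.List.foldl_append_eq_flatMap]; simp

-- ----- B side: the tokenizer, abstracted from the fold state -----

-- the list of tokens Source B's inner loop emits from remaining input l, given buffer/pending state
def pvTokens : List Char → List Char → List Char → List (List Char)
  | [], buf, _ => if buf.isEmpty then [] else [buf]
  | c :: cs, buf, pend =>
    if c = ',' then (if buf.isEmpty then [] else [buf]) ++ pvTokens cs [] []
    else if PySem.Chars.isspace c then pvTokens cs buf (if buf.isEmpty then pend else pend ++ [c])
    else pvTokens cs (buf ++ pend ++ [c]) []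

theorem pv_fold_scan (l : List Char) (pr : List String) (buf pend : List Char) :
    (let st := l.foldl pvScanStep (pr, buf, pend);
     if st.2.1.isEmpty then st.1 else st.1 ++ [String.ofList st.2.1])
    = pr ++ (pvTokens l buf pend).map String.ofList := by
  induction l generalizing pr buf pend with
  | nil => cases hb : buf.isEmpty <;> simp [pvTokens, hb]
  | cons c cs ih =>
    simp only [List.foldl_cons]
    by_cases hc : c = ','
    · subst hc
      rw [show pvScanStep (pr, buf, pend) ','
            = ((if buf.isEmpty then pr else pr ++ [String.ofList buf]), [], []) from by
          simp [pvScanStep]]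
      rw [show pvTokens (',' :: cs) buf pend
            = (if buf.isEmpty then [] else [buf]) ++ pvTokens cs [] [] from by
          simp [pvTokens]]
      rw [ih]
      cases hb : buf.isEmpty <;> simp [hb]
    · by_cases hs : PySem.Chars.isspace c
      · rw [show pvScanStep (pr, buf, pend) c
              = (pr, buf, if buf.isEmpty then pend else pend ++ [c]) from by
            simp [pvScanStep, hc, hs]]
        rw [show pvTokens (c :: cs) buf pend
              = pvTokens cs buf (if buf.isEmpty then pend else pend ++ [c]) from by
            simp [pvTokens, hc, hs]]
        exact ih pr buf _
      · rw [show pvScanStep (pr, buf, pend) c = (pr, buf ++ pend ++ [c], []) from by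
            simp [pvScanStep, hc, hs]]
        rw [show pvTokens (c :: cs) buf pend = pvTokens cs (buf ++ pend ++ [c]) [] from by
            simp [pvTokens, hc, hs]]
        exact ih pr _ []

theorem pv_rstrip_all_space (l : List Char) (h : ∀ c ∈ l, PySem.Chars.isspace c = true) :
    PySem.Chars.rstrip l = [] := by
  unfold PySem.Chars.rstrip
  rw [List.dropWhile_eq_nil_iff.mpr (fun c hc => h c (List.mem_reverse.mp hc))]
  rfl

theorem pv_rstrip_cons_nonspace (c : Char) (l : List Char) (h : PySem.Chars.isspace c = false) :
    PySem.Chars.rstrip (c :: l) = c :: PySem.Chars.rstrip l := by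
  unfold PySem.Chars.rstrip
  rw [show (c :: l).reverse = l.reverse ++ [c] from by simp, List.dropWhile_append]
  by_cases he : (List.dropWhile PySem.Chars.isspace l.reverse).isEmpty
  · simp [he, List.dropWhile, h, List.isEmpty_iff.mp he]
  · simp [he]

theorem pv_rstrip_append_nonspace (p : List Char) (c : Char) (l : List Char)
    (h : PySem.Chars.isspace c = false) :
    PySem.Chars.rstrip (p ++ c :: l) = p ++ PySem.Chars.rstrip (c :: l) := by
  unfold PySem.Chars.rstrip
  rw [List.reverse_append, List.dropWhile_append]
  have hne : (List.dropWhile PySem.Chars.isspace (c :: l).reverse) ≠ [] := by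
    intro hnil
    have := List.dropWhile_eq_nil_iff.mp hnil c (by simp)
    simp [h] at this
  rw [if_neg (by simpa [List.isEmpty_iff] using hne)]
  simp

theorem pv_strip_cons_space (c : Char) (l : List Char) (h : PySem.Chars.isspace c = true) :
    PySem.Chars.strip (c :: l) = PySem.Chars.strip l := by
  unfold PySem.Chars.strip PySem.Chars.lstrip
  simp [List.dropWhile, h]

theorem pv_strip_cons_nonspace (c : Char) (l : List Char) (h : PySem.Chars.isspace c = false) :
    PySem.Chars.strip (c :: l) = c :: PySem.Chars.rstrip l := by
  unfold PySem.Chars.strip PySem.Chars.lstrip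
  rw [List.dropWhile_cons_of_neg (by simp [h])]
  exact pv_rstrip_cons_nonspace c l h

-- the tokenizer computes strip-and-filter of the comma split
theorem pv_tokens_eq (l : List Char) : ∀ (buf pend : List Char),
    (∀ c ∈ pend, PySem.Chars.isspace c = true) → (buf = [] → pend = []) →
    pvTokens l buf pend =
      (match pvSplitC ',' l with
       | [] => []
       | h :: t =>
         (let tok := if buf.isEmpty then PySem.Chars.strip h
                     else buf ++ PySem.Chars.rstrip (pend ++ h);
          (if tok.isEmpty then [] else [tok])
            ++ (t.map PySem.Chars.strip).filter (fun x => !x.isEmpty))) := by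
  induction l with
  | nil =>
    intro buf pend hp hb
    by_cases hbuf : buf = []
    · have hpend : pend = [] := hb hbuf
      subst hbuf hpend
      simp [pvTokens, pvSplitC, PySem.Chars.strip, PySem.Chars.lstrip, PySem.Chars.rstrip]
    · have hbe : buf.isEmpty = false := by simpa [List.isEmpty_iff] using hbuf
      have hr : PySem.Chars.rstrip pend = [] := pv_rstrip_all_space pend hp
      simp [pvTokens, pvSplitC, hbe, hr, hbuf]
  | cons c cs ih =>
    intro buf pend hp hb
    rcases hne : pvSplitC ',' cs with _ | ⟨h', t'⟩
    · exact absurd hne (pvSplitC_ne_nil ',' cs)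
    by_cases hc : c = ','
    · subst hc
      rw [show pvTokens (',' :: cs) buf pend
            = (if buf.isEmpty then [] else [buf]) ++ pvTokens cs [] [] from by simp [pvTokens]]
      rw [ih [] [] (by simp) (fun _ => rfl), hne]
      rw [show pvSplitC ',' (',' :: cs) = [] :: h' :: t' from by simp [pvSplitC, hne]]
      have hr : PySem.Chars.rstrip pend = [] := pv_rstrip_all_space pend hp
      have hs0 : PySem.Chars.strip ([] : List Char) = [] := rfl
      by_cases hse : (PySem.Chars.strip h').isEmpty = true
      · by_cases hbuf : buf = []
        · subst hbuf; simp [hs0, hse, List.filter_cons]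
        · have hbe : buf.isEmpty = false := by simpa [List.isEmpty_iff] using hbuf
          simp [hbe, hr, hbuf, hse, List.filter_cons]
      · by_cases hbuf : buf = []
        · subst hbuf; simp [hs0, hse, List.filter_cons]
        · have hbe : buf.isEmpty = false := by simpa [List.isEmpty_iff] using hbuf
          simp [hbe, hr, hbuf, hse, List.filter_cons]
    · have hsplit : pvSplitC ',' (c :: cs) = (c :: h') :: t' := by
        simp [pvSplitC, if_neg hc, hne]
      rw [hsplit]
      by_cases hs : PySem.Chars.isspace c
      · rw [show pvTokens (c :: cs) buf pend
              = pvTokens cs buf (if buf.isEmpty then pend else pend ++ [c]) from by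
            simp [pvTokens, hc, hs]]
        by_cases hbuf : buf = []
        · have hpend : pend = [] := hb hbuf
          subst hbuf hpend
          simp only [List.isEmpty_nil, if_true]
          rw [ih [] [] (by simp) (fun _ => rfl), hne]
          simp only [List.isEmpty_nil, if_true]
          rw [pv_strip_cons_space c h' hs]
        · have hbe : buf.isEmpty = false := by simpa [List.isEmpty_iff] using hbuf
          simp only [hbe, Bool.false_eq_true, if_false]
          rw [ih buf (pend ++ [c]) (by intro x hx; rcases List.mem_append.mp hx with h1 | h1
                                       · exact hp x h1
                                       · simp at h1; subst h1; exact hs)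
                (fun hnil => absurd hnil hbuf), hne]
          simp [hbe, List.append_assoc]
      · have hsF : PySem.Chars.isspace c = false := by simpa using hs
        rw [show pvTokens (c :: cs) buf pend = pvTokens cs (buf ++ pend ++ [c]) [] from by
            simp [pvTokens, hc, hs]]
        rw [ih (buf ++ pend ++ [c]) [] (by simp) (by simp), hne]
        have hnbe : (buf ++ pend ++ [c]).isEmpty = false := by simp
        simp only [hnbe, Bool.false_eq_true, if_false, List.append_nil]
        by_cases hbuf : buf = []
        · have hpend : pend = [] := hb hbuf
          subst hbuf hpend
          simp only [List.isEmpty_nil, if_true, List.nil_append]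
          rw [pv_strip_cons_nonspace c h' hsF]
          simp
        · have hbe : buf.isEmpty = false := by simpa [List.isEmpty_iff] using hbuf
          simp only [hbe, Bool.false_eq_true, if_false]
          rw [pv_rstrip_append_nonspace pend c h' hsF, pv_rstrip_cons_nonspace c h' hsF]
          simp [hbuf, List.append_assoc]

theorem pv_tokens_piece (s : String) :
    (pvTokens s.toList [] []).map String.ofList = pvPiece s := by
  rw [pv_tokens_eq s.toList [] [] (by simp) (fun _ => rfl)]
  rcases hne : pvSplitC ',' s.toList with _ | ⟨h', t'⟩
  · exact absurd hne (pvSplitC_ne_nil ',' s.toList)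
  · have hofl : ∀ x : List Char, PySem.Str.strip (String.ofList x) = String.ofList (PySem.Chars.strip x) := by
      intro x; simp [PySem.Str.strip]
    have hemp : ∀ x : List Char, ((String.ofList x) != "") = !x.isEmpty := by
      intro x
      cases x with
      | nil => rfl
      | cons a b =>
        simp only [List.isEmpty_cons, Bool.not_false]
        rw [bne_iff_ne]
        intro hcontr
        have h2 : (String.ofList (a :: b)).toList = ("" : String).toList := by rw [hcontr]
        simp at h2
    unfold pvPiece
    rw [pv_splitOn_eq, hne]
    simp only [List.map_map, List.map_cons, Function.comp_def, hofl, List.filter_cons, hemp]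
    rw [List.filter_map, List.filter_map]
    simp only [Function.comp_def, hemp, List.map_map]
    by_cases hse : (PySem.Chars.strip h').isEmpty = true <;> simp [hse]

theorem pv_B_eq_flatMap (gs : List String) :
    gs.foldl (fun processed pattern =>
      let st := pattern.toList.foldl pvScanStep (processed, [], [])
      if st.2.1.isEmpty then st.1 else st.1 ++ [String.ofList st.2.1]) []
    = gs.flatMap pvPiece := by
  calc gs.foldl (fun processed pattern =>
          let st := pattern.toList.foldl pvScanStep (processed, [], [])
          if st.2.1.isEmpty then st.1 else st.1 ++ [String.ofList st.2.1]) []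
      = gs.foldl (fun acc pattern => acc ++ pvPiece pattern) [] := by
        apply PySem.List.foldl_congr_mem
        intro acc pattern _
        rw [pv_fold_scan pattern.toList acc [] [], pv_tokens_piece]
    _ = gs.flatMap pvPiece := by
        rw [PySem.List.foldl_append_eq_flatMap]; simp

-- ===== VERDICT =====
theorem parse_globs_py_spec : Claim_equal_parse_globs_py := by
  intro globs _
  unfold Spec_parse_globs_py parse_globs_py parse_globs_py_alt
  match globs with
  | none => rfl
  | some gs =>
    by_cases hE : gs.isEmpty
    · simp [hE]
    · simp only [hE, Bool.false_eq_true, if_false]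
      rw [pv_A_eq_flatMap, pv_B_eq_flatMap]
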